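-- pv_equiv track=rewrite | github.com/namgun18/namgun-workspace | backend/app/mail/jmap.py | _encode_account_id
-- ===== SOURCE A (Python) =====
-- def _encode_account_id(principal_id: int) -> str:
--     """Encode principal_id to Stalwart JMAP accountId (bijective base-26).
--
--     Stalwart uses: a=0, b=1, ..., z=25, aa=26, ab=27, ...
--     """
--     if principal_id < 26:
--         return chr(ord("a") + principal_id)
--     result = ""
--     n = principal_id
--     while n >= 0:
--         result = chr(ord("a") + (n % 26)) + result
--         n = n // 26 - 1
--         if n < 0:
--             break
--     return result
-- ===== SOURCE B (Python) =====
-- def _encode_account_id(principal_id: int) -> str: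
--     if principal_id < 26:
--         return chr(ord("a") + principal_id)
--     return _encode_account_id(principal_id // 26 - 1) + chr(ord("a") + principal_id % 26)
-- ===== Notes on version B (the rewrite author's own statement) =====
-- stated objective: simpler
-- what changed: Replaces the iterative prepend-in-a-loop (with a separate early-return fast path and an in-loop break) by a direct recursion on the high digits that appends the low digit on return; the base case subsumes A's redundant early return.
import Mathlib
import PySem

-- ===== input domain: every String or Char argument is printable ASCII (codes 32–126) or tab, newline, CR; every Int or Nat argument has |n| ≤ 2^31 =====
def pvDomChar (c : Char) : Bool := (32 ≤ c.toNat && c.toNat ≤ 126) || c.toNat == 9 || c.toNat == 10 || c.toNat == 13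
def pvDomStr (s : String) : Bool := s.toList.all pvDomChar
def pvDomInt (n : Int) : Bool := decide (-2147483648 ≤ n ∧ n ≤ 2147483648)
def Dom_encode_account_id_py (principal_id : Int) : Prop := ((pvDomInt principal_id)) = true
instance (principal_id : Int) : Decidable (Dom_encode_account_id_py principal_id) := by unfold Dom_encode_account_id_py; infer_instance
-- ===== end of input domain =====

-- B replaces A's prepend-in-a-loop (with early return and break) by a direct
-- recursion on the high digits, appending the low digit on return ('simpler').


-- bridge from PySem's floor division to Lean's Int `/` (divisor 26 > 0: they coincide);
-- cited by the ports' decreasing_by, so it stays above the ports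
theorem pv_fdiv26 (n : Int) : PySem.Int.floordiv n 26 = n / 26 := by
  simp only [PySem.Int.floordiv]; rw [Int.fdiv_eq_ediv]; simp

-- ===== PORT A =====
-- chr(ord("a") + k) is exact here: under Pre_ the argument is a valid code point.
def pvChr (k : Int) : String := String.mk [Char.ofNat (97 + k).toNat]

-- the while-loop of A: while n >= 0 { prepend digit; n = n//26 - 1; if n < 0 break }
def pvALoop (n : Int) (result : String) : String :=
  if _h : 0 ≤ n then
    let result' := pvChr (PySem.Int.mod n 26) ++ result
    let n' := PySem.Int.floordiv n 26 - 1
    if n' < 0 then result' else pvALoop n' result'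
  else result
termination_by (n + 1).toNat
decreasing_by
  simp only [pv_fdiv26] at *
  omega

def encode_account_id_py (principal_id : Int) : String :=
  if principal_id < 26 then pvChr principal_id
  else pvALoop principal_id ""

-- ===== PORT B =====
def encode_account_id_py_alt (principal_id : Int) : String :=
  if _h : principal_id < 26 then pvChr principal_id
  else encode_account_id_py_alt (PySem.Int.floordiv principal_id 26 - 1)
        ++ pvChr (PySem.Int.mod principal_id 26)
termination_by principal_id.toNat
decreasing_by
  simp only [pv_fdiv26] at *
  omega

-- ===== PRECONDITION & SPEC =====
-- Pre_ excludes exactly the inputs where A raises ValueError: chr(ord('a')+n) needs n ≥ -97.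
def Pre_encode_account_id_py (principal_id : Int) : Prop := -97 ≤ principal_id
instance (principal_id : Int) : Decidable (Pre_encode_account_id_py principal_id) := by unfold Pre_encode_account_id_py; infer_instance
def pvWitness_encode_account_id_py : Int := (702)

def Spec_encode_account_id_py (principal_id : Int) (out : String) : Prop := out = encode_account_id_py_alt principal_id
instance (principal_id : Int) (out : String) : Decidable (Spec_encode_account_id_py principal_id out) := by unfold Spec_encode_account_id_py; infer_instance

-- ===== CLAIM (what is proved, stated in full; the proofs are below) =====
def Claim_equal_encode_account_id_py : Prop := ∀ (principal_id : Int), Dom_encode_account_id_py principal_id → Pre_encode_account_id_py principal_id → Spec_encode_account_id_py principal_id (encode_account_id_py principal_id)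

-- ===== LEMMAS AND PROOFS =====

-- bridge from PySem's floor modulo to Lean's Int `%` (positive divisor: they coincide)
theorem pv_fmod26 (n : Int) : PySem.Int.mod n 26 = n % 26 := by
  simp only [PySem.Int.mod]; rw [Int.fmod_eq_emod]; simp

-- one unrolling of A's loop body equals B's recursion step / base case
theorem pvALoop_step (n : Int) (hn : 0 ≤ n) (result : String) :
    pvALoop n result =
      if n < 26 then encode_account_id_py_alt n ++ result
      else pvALoop (PySem.Int.floordiv n 26 - 1)
             (pvChr (PySem.Int.mod n 26) ++ result) := by
  rw [pvALoop]
  rw [dif_pos hn]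
  by_cases h26 : n < 26
  · rw [if_pos h26, if_pos (by rw [pv_fdiv26]; omega)]
    rw [encode_account_id_py_alt, dif_pos h26, pv_fmod26]
    have : n % 26 = n := by omega
    rw [this]
  · rw [if_neg h26, if_neg (by rw [pv_fdiv26]; omega)]

-- loop invariant: for non-negative n the loop yields B's encoding prepended to result
theorem pvALoop_eq_alt (k : Nat) : ∀ (n : Int), 0 ≤ n → n.toNat ≤ k →
    ∀ result, pvALoop n result = encode_account_id_py_alt n ++ result := by
  induction k with
  | zero =>
    intro n hn hk result
    have h26 : n < 26 := by omega
    rw [pvALoop_step n hn, if_pos h26]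
  | succ k ih =>
    intro n hn hk result
    rw [pvALoop_step n hn]
    by_cases h26 : n < 26
    · rw [if_pos h26]
    · rw [if_neg h26]
      have hq : 0 ≤ PySem.Int.floordiv n 26 - 1 := by rw [pv_fdiv26]; omega
      have hlt : (PySem.Int.floordiv n 26 - 1).toNat ≤ k := by rw [pv_fdiv26]; omega
      rw [ih _ hq hlt]
      conv_rhs => rw [encode_account_id_py_alt]
      rw [dif_neg h26, String.append_assoc]

-- ===== VERDICT (by name: the statement is the Claim_ definition above) =====
theorem encode_account_id_py_spec : Claim_equal_encode_account_id_py := by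
  intro n _ _
  unfold Spec_encode_account_id_py encode_account_id_py
  by_cases h : n < 26
  · rw [if_pos h, encode_account_id_py_alt, dif_pos h]
  · rw [if_neg h, pvALoop_eq_alt n.toNat n (by omega) le_rfl "", String.append_empty]
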